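-- pv_equiv track=rewrite | github.com/PolicyEngine/grants | nsf-cssi/tools/nsf_grant_assembler/utils/text.py | clean_markdown
-- ===== SOURCE A (Python) =====
-- def clean_markdown(text: str) -> str:
--     """Clean markdown text for processing while preserving structure."""
--     # Remove excessive whitespace but preserve paragraph breaks
--     lines = text.split('\n')
--     cleaned_lines = []
--
--     for line in lines:
--         stripped = line.strip()
--         if stripped or (cleaned_lines and cleaned_lines[-1]):  # Keep structure
--             cleaned_lines.append(stripped)
--
--     return '\n'.join(cleaned_lines)
-- ===== SOURCE B (Python) =====
-- def clean_markdown(text: str) -> str: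
--     """Clean markdown text for processing while preserving structure."""
--     stripped = [line.strip() for line in text.split('\n')]
--     # Extract paragraphs (maximal runs of non-blank lines), then rebuild:
--     # paragraphs are joined by a single blank line; a trailing blank line
--     # after the last paragraph is kept as one trailing newline.
--     runs = []
--     i = 0
--     while i < len(stripped):
--         if stripped[i] == '':
--             i += 1
--             continue
--         j = i
--         while j < len(stripped) and stripped[j] != '':
--             j += 1
--         runs.append(stripped[i:j])
--         i = j
--     body = '\n\n'.join('\n'.join(run) for run in runs)
--     if runs and stripped[-1] == '':
--         body += '\n'
--     return body
-- ===== Notes on version B (the rewrite author's own statement) =====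
-- stated objective: alternative
-- what changed: Replaced A's single pass with last-emitted-line state by a run-based two-phase algorithm: strip all lines, extract maximal non-blank runs (paragraphs) with an index scan, join paragraphs with a blank line, and append one trailing newline when the text ends in blank lines after content.
import Mathlib
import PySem

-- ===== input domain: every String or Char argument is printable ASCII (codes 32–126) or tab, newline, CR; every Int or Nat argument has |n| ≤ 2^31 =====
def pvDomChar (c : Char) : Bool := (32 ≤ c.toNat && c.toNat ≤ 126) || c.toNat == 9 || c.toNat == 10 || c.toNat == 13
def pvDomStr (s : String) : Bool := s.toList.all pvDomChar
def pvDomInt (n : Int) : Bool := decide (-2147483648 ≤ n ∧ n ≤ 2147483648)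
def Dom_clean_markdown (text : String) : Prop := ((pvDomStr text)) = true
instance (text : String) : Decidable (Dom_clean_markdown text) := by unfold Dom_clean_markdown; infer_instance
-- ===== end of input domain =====

-- B replaces A's last-emitted-line state machine by a run-based two-phase algorithm:
-- extract maximal non-blank runs (paragraphs), join them with one blank line,
-- and restore a single trailing newline when the text ends blank after content.

-- ===== PORT A =====
-- the for-loop over lines with accumulator cleaned_lines
def cmLoop (cleaned_lines : List String) (lines : List String) : List String :=
  match lines with
  | [] => cleaned_lines
  | line :: rest =>
      let stripped := PySem.Str.strip line
      -- 'stripped or (cleaned_lines and cleaned_lines[-1])'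
      if stripped ≠ "" ∨ (cleaned_lines ≠ [] ∧ (PySem.List.pyGet? cleaned_lines (-1)).getD "" ≠ "") then
        cmLoop (cleaned_lines ++ [stripped]) rest
      else
        cmLoop cleaned_lines rest

def clean_markdown (text : String) : String :=
  let lines := (PySem.Str.split? text "\n").getD []   -- sep "\n" ≠ "", so split? is some
  PySem.Str.join "\n" (cmLoop [] lines)

-- ===== PORT B =====
-- Source B's index scan 'while i < len: skip a blank / inner while collects the maximal
-- non-blank run stripped[i:j]' as structural recursion on the list of stripped lines.
def collectRuns (s : List String) : List (List String) :=
  match s with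
  | [] => []
  | x :: rest =>
      if x = "" then collectRuns rest
      else (x :: rest.takeWhile (· ≠ "")) :: collectRuns (rest.dropWhile (· ≠ ""))
termination_by s.length
decreasing_by
  · simp
  · exact Nat.lt_succ_of_le (List.length_dropWhile_le _ _)

def clean_markdown_alt (text : String) : String :=
  let stripped := ((PySem.Str.split? text "\n").getD []).map PySem.Str.strip
  let runs := collectRuns stripped
  let body := PySem.Str.join "\n\n" (runs.map (PySem.Str.join "\n"))
  if runs ≠ [] ∧ (PySem.List.pyGet? stripped (-1)).getD "" = "" then body ++ "\n" else body

-- ===== PRECONDITION & SPEC =====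
def Spec_clean_markdown (text : String) (out : String) : Prop := out = clean_markdown_alt text
instance (text : String) (out : String) : Decidable (Spec_clean_markdown text out) := by unfold Spec_clean_markdown; infer_instance

-- ===== CLAIM (what is proved, stated in full; the proofs are below) =====
def Claim_equal_clean_markdown : Prop := ∀ (text : String), Dom_clean_markdown text → Spec_clean_markdown text (clean_markdown text)

-- ===== LEMMAS AND PROOFS =====

-- canonical per-line recursion: keep x iff x nonblank or the previous stripped line was nonblank
def cmClean : List String → Bool → List String
  | [], _ => []
  | x :: r, prev => if x ≠ "" ∨ prev = true then x :: cmClean r (!(x == "")) else cmClean r false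

-- flatten runs with one blank separator line
def runsFlat : List (List String) → List String
  | [] => []
  | [r] => r
  | r :: rs => r ++ "" :: runsFlat rs

lemma cmLoop_eq (lines : List String) : ∀ (acc : List String) (prev : Bool),
    ((acc ≠ [] ∧ (PySem.List.pyGet? acc (-1)).getD "" ≠ "") ↔ prev = true) →
    cmLoop acc lines = acc ++ cmClean (lines.map PySem.Str.strip) prev := by
  induction lines with
  | nil => intro acc prev _; simp [cmLoop, cmClean]
  | cons line rest ih =>
    intro acc prev h
    simp only [cmLoop, List.map_cons, cmClean]
    by_cases hc : PySem.Str.strip line ≠ "" ∨ prev = true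
    · rw [if_pos (by tauto)]
      rw [ih (acc ++ [PySem.Str.strip line]) (!(PySem.Str.strip line == ""))
            (by simp [PySem.List.pyGet?, PySem.List.pyIdx?])]
      rw [if_pos hc]; simp
    · rw [not_or] at hc
      rw [if_neg (by rw [h]; tauto), if_neg (by tauto)]
      have hp : prev = false := by simpa using hc.2
      subst hp
      exact ih acc false h

lemma collectRuns_blank (rest : List String) : collectRuns ("" :: rest) = collectRuns rest := by
  simp [collectRuns]

lemma collectRuns_nonblank (x : String) (rest : List String) (hx : x ≠ "") :
    collectRuns (x :: rest) =
      (x :: rest.takeWhile (· ≠ "")) :: collectRuns (rest.dropWhile (· ≠ "")) := by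
  simp [collectRuns, hx]

lemma collectRuns_nil_iff (s : List String) : collectRuns s = [] ↔ ∀ y ∈ s, y = "" := by
  induction s using collectRuns.induct with
  | case1 => simp [collectRuns]
  | case2 rest ih => simp [collectRuns, ih]
  | case3 x rest hx ih => simp [collectRuns, hx]

lemma collectRuns_ne_nil_mem (s : List String) : ∀ r ∈ collectRuns s, r ≠ [] := by
  induction s using collectRuns.induct with
  | case1 => simp [collectRuns]
  | case2 rest ih => simpa [collectRuns] using ih
  | case3 x rest hx ih =>
    intro r hr
    rw [collectRuns_nonblank x rest hx] at hr
    rcases List.mem_cons.mp hr with h | h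
    · subst h; simp
    · exact ih r h

lemma cmClean_run (t : List String) (d : List String) (h : ∀ y ∈ t, y ≠ "") :
    cmClean (t ++ d) true = t ++ cmClean d true := by
  induction t with
  | nil => simp
  | cons y t' ih =>
    have hy : y ≠ "" := h y (by simp)
    simp only [List.cons_append, cmClean]
    rw [if_pos (by tauto)]
    have : (!(y == "")) = true := by simpa using hy
    rw [this, ih (fun z hz => h z (by simp [hz]))]

lemma blank_getLast (l : List String) (hne : l ≠ []) (h : ∀ y ∈ l, y = "") :
    l.getLast?.getD "" = "" := by
  rw [List.getLast?_eq_some_getLast hne]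
  exact h _ (List.getLast_mem hne)

lemma cmClean_runs (s : List String) :
    cmClean s false = runsFlat (collectRuns s) ++
      (if collectRuns s ≠ [] ∧ s.getLast?.getD "" = "" then [""] else []) := by
  induction s using collectRuns.induct with
  | case1 => simp [cmClean, collectRuns, runsFlat]
  | case2 rest ih =>
    have hL : cmClean ("" :: rest) false = cmClean rest false := by
      simp only [cmClean]; rw [if_neg (by simp)]
    rw [hL, ih, collectRuns_blank]
    rcases rest with _ | ⟨y, r'⟩
    · simp [collectRuns, runsFlat]
    · simp [List.getLast?_cons_cons]
  | case3 x rest hx ih =>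
    set t := rest.takeWhile (· ≠ "") with ht
    set d := rest.dropWhile (· ≠ "") with hd
    have hrest : t ++ d = rest := List.takeWhile_append_dropWhile
    have htne : ∀ y ∈ t, y ≠ "" := by
      intro y hy
      have := List.mem_takeWhile_imp (ht ▸ hy)
      simpa using this
    have hL : cmClean (x :: rest) false = x :: cmClean rest true := by
      simp only [cmClean]
      rw [if_pos (by tauto)]
      have : (!(x == "")) = true := by simpa using hx
      rw [this]
    have hCR : collectRuns (x :: rest) = (x :: t) :: collectRuns d :=
      collectRuns_nonblank x rest hx
    rw [hL, ← hrest, cmClean_run t d htne, hrest, hCR]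
    rcases hD : d with _ | ⟨y, d'⟩
    · -- no blank after the run: rest = t, everything nonblank
      have hrt : rest = t := by rw [← hrest, hD, List.append_nil]
      have hlast : (x :: rest).getLast?.getD "" ≠ "" := by
        rw [List.getLast?_eq_some_getLast (l := x :: rest) (by simp)]
        have hm := List.getLast_mem (l := x :: rest) (by simp)
        rcases List.mem_cons.mp hm with h'' | h''
        · rw [h'']; exact hx
        · exact htne _ (hrt ▸ h'')
      rw [if_neg (by tauto)]
      simp [hD, collectRuns, runsFlat, cmClean]
    · -- a blank line follows the run
      have hy : y = "" := by
        have := List.head?_dropWhile_not (· ≠ "") rest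
        rw [← hd, hD] at this
        simpa using this
      subst hy
      have htrue : cmClean ("" :: d') true = "" :: cmClean d' false := by
        simp only [cmClean]
        rw [if_pos (by tauto)]
        simp
      have hfalse : cmClean ("" :: d') false = cmClean d' false := by
        simp only [cmClean]; rw [if_neg (by simp)]
      have hCRd : collectRuns ("" :: d') = collectRuns d' := collectRuns_blank d'
      rw [hD] at ih
      rw [hfalse, hCRd] at ih
      have hlastS : (x :: rest).getLast?.getD "" = ("" :: d').getLast?.getD "" := by
        have h1 : (x :: rest).getLast? = rest.getLast? := by
          have : rest ≠ [] := by
            intro hcon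
            rw [hcon, hD] at hrest
            simp at hrest
          rw [show (x :: rest) = [x] ++ rest by simp, List.getLast?_append_of_ne_nil _ this]
        have h2 : rest.getLast? = ("" :: d').getLast? := by
          rw [← hrest, hD, List.getLast?_append_of_ne_nil _ (by simp)]
        rw [h1, h2]
      rw [htrue, ih]
      rcases hRS : collectRuns d' with _ | ⟨r0, rs'⟩
      · -- everything after the run is blank
        have hblank : ∀ z ∈ d', z = "" := (collectRuns_nil_iff d').mp hRS
        have hl' : ("" :: d').getLast?.getD "" = "" := by
          apply blank_getLast _ (by simp)
          intro z hz
          rcases List.mem_cons.mp hz with h | h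
          · exact h
          · exact hblank z h
        rw [if_neg (by simp [hRS])]
        rw [if_pos ⟨by simp, hlastS.trans hl'⟩]
        simp [collectRuns_blank, hRS, runsFlat]
      · -- more runs follow
        have hrf : runsFlat ((x :: t) :: r0 :: rs') = (x :: t) ++ "" :: runsFlat (r0 :: rs') := rfl
        rw [hCRd, hRS, hrf]
        by_cases hlb : ("" :: d').getLast?.getD "" = ""
        · rw [if_pos ⟨by simp, hlb⟩, if_pos ⟨by simp, hlastS.trans hlb⟩]
          simp
        · rw [if_neg (fun hcase => hlb hcase.2),
              if_neg (fun hcase => hlb (hlastS ▸ hcase.2))]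
          simp

-- join algebra over character lists
lemma chars_join_append (sep : List Char) (a b : List (List Char)) (ha : a ≠ []) (hb : b ≠ []) :
    PySem.Chars.join sep (a ++ b) = PySem.Chars.join sep a ++ sep ++ PySem.Chars.join sep b := by
  induction a with
  | nil => exact absurd rfl ha
  | cons x a' ih =>
    rcases a' with _ | ⟨x', a''⟩
    · rcases b with _ | ⟨y, b'⟩
      · exact absurd rfl hb
      · rw [List.singleton_append, PySem.Chars.join_cons_cons, PySem.Chars.join_singleton]
    · rw [List.cons_append, List.cons_append, PySem.Chars.join_cons_cons,
          PySem.Chars.join_cons_cons, ← List.cons_append, ih (by simp)]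
      simp [List.append_assoc]

lemma str_join_cons_cons (sep x y : String) (g : List String) :
    PySem.Str.join sep (x :: y :: g) = x ++ sep ++ PySem.Str.join sep (y :: g) := by
  apply String.toList_inj.mp
  simp only [PySem.Str.toList_join, List.map_cons, String.toList_append]
  rw [PySem.Chars.join_cons_cons]

lemma str_join_run_blank (a b : List String) (ha : a ≠ []) (hb : b ≠ []) :
    PySem.Str.join "\n" (a ++ "" :: b) =
      PySem.Str.join "\n" a ++ "\n\n" ++ PySem.Str.join "\n" b := by
  apply String.toList_inj.mp
  simp only [PySem.Str.toList_join, List.map_append, List.map_cons, String.toList_append]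
  rw [chars_join_append _ (a.map String.toList) _ (by simpa using ha) (by simp)]
  rcases b with _ | ⟨y, b'⟩
  · exact absurd rfl hb
  · simp only [List.map_cons]
    rw [show (("" : String).toList :: y.toList :: b'.map String.toList)
          = ([] : List Char) :: y.toList :: b'.map String.toList from rfl,
        PySem.Chars.join_cons_cons]
    have h2 : ("\n\n" : String).toList = ("\n" : String).toList ++ ("\n" : String).toList := rfl
    simp [h2, List.append_assoc]

lemma join_runsFlat (rs : List (List String)) (h : ∀ r ∈ rs, r ≠ []) :
    PySem.Str.join "\n" (runsFlat rs) = PySem.Str.join "\n\n" (rs.map (PySem.Str.join "\n")) := by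
  induction rs with
  | nil => rfl
  | cons r rs' ih =>
    rcases rs' with _ | ⟨r', rs''⟩
    · apply String.toList_inj.mp
      simp [runsFlat, PySem.Str.toList_join, PySem.Chars.join_singleton]
    · have hr : r ≠ [] := h r (by simp)
      have hflat : runsFlat (r' :: rs'') ≠ [] := by
        have hr' : r' ≠ [] := h r' (by simp)
        rcases rs'' with _ | _ <;> simp [runsFlat, hr']
      have hstep : runsFlat (r :: r' :: rs'') = r ++ "" :: runsFlat (r' :: rs'') := rfl
      rw [hstep, str_join_run_blank r _ hr hflat, ih (fun z hz => h z (by simp [hz]))]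
      simp only [List.map_cons]
      rw [str_join_cons_cons]

lemma join_append_blank (l : List String) (h : l ≠ []) :
    PySem.Str.join "\n" (l ++ [""]) = PySem.Str.join "\n" l ++ "\n" := by
  apply String.toList_inj.mp
  simp only [PySem.Str.toList_join, List.map_append, List.map_cons, List.map_nil, String.toList_append]
  rw [chars_join_append _ (l.map String.toList) [("" : String).toList] (by simpa using h) (by simp)]
  simp [PySem.Chars.join_singleton]

lemma pyGet_neg_one (l : List String) : (PySem.List.pyGet? l (-1)).getD "" = l.getLast?.getD "" := by
  rcases l with _ | ⟨x, r⟩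
  · rfl
  · simp [PySem.List.pyGet?, PySem.List.pyIdx?, List.getLast?_eq_getElem?]

-- ===== VERDICT (by name: the statement is the Claim_ definition above) =====
theorem clean_markdown_spec : Claim_equal_clean_markdown := by
  intro text _
  unfold Spec_clean_markdown
  simp only [clean_markdown, clean_markdown_alt]
  rw [cmLoop_eq _ [] false (by simp)]
  rw [List.nil_append, cmClean_runs, pyGet_neg_one]
  set s := ((PySem.Str.split? text "\n").getD []).map PySem.Str.strip with hs
  by_cases hc : collectRuns s ≠ [] ∧ s.getLast?.getD "" = ""
  · rw [if_pos hc, if_pos hc]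
    have hne : runsFlat (collectRuns s) ≠ [] := by
      rcases hcr : collectRuns s with _ | ⟨r, rs⟩
      · exact absurd hcr hc.1
      · have hr : r ≠ [] := collectRuns_ne_nil_mem s r (by rw [hcr]; simp)
        rcases rs with _ | _ <;> simp [runsFlat, hr]
    rw [join_append_blank _ hne, join_runsFlat _ (collectRuns_ne_nil_mem s)]
  · rw [if_neg hc, if_neg hc, List.append_nil,
        join_runsFlat _ (collectRuns_ne_nil_mem s)]
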